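-- pv_equiv track=rewrite | github.com/KojiNagahara/Python | TextExercise/12-2/util.py | genPowerset
-- ===== SOURCE A (Python) =====
-- def getBinaryRep(n, num_digits):
--     """nとnum_digitsが非負のint型とし、
--        nの値をnum_digits桁の２進数であらわす文字列を返す"""
--     result = ''
--     while n > 0 :
--         result = str(n%2)+result
--         n = n//2
--     if len(result) > num_digits :
--         raise ValueError('桁数が足りません:'+str(num_digits))
--
--     for i in range(num_digits - len(result)) :
--         result = '0'+result
--
--     return result
--
-- def genPowerset(L):
--     """Lをリストとする。
--        Lの要素のすべての可能な組み合わせから成るリストを返す"""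
--
--     powerset = []
--
--     for i in range(1, 2**len(L)):
--         binStr = getBinaryRep(i, len(L))
--         subset = []
--
--         for j in range(len(L)):
--             if binStr[j] == '1':
--                 subset.append(L[j])
--
--         powerset.append(subset)
--
--     return powerset
-- ===== SOURCE B (Python) =====
-- def genPowerset(L):
--     """Lをリストとする。
--        Lの要素のすべての可能な組み合わせから成るリストを返す"""
--     result = [[]]
--     for x in reversed(L):
--         result = result + [[x] + s for s in result]
--     return result[1:]
-- ===== Notes on version B (the rewrite author's own statement) =====
-- stated objective: faster
-- what changed: Replaces per-mask binary-string encoding/decoding (getBinaryRep plus an inner index scan per mask) with iterative doubling: start from the singleton list holding the empty subset, for each element of reversed(L) append the element-prepended copies of all subsets built so far, and finally drop the leading empty subset.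
import Mathlib
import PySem

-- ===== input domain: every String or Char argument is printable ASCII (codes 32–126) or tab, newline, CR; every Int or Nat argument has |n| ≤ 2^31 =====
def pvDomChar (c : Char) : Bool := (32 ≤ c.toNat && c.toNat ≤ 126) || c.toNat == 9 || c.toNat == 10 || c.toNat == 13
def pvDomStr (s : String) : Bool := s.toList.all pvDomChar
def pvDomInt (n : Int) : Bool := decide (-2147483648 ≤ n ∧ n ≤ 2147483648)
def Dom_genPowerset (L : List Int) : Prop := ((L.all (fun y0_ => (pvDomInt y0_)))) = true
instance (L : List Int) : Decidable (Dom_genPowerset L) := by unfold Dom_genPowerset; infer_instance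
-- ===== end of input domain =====

-- B replaces A's per-mask binary-string decoding with iterative doubling of the subset list: simpler and no string work.


-- ===== PORT A =====
-- the 'while n > 0' loop of getBinaryRep
def grLoop (n : Int) (result : String) : String :=
  if h : n > 0 then
    grLoop (PySem.Int.floordiv n 2) (PySem.Int.toStr (PySem.Int.mod n 2) ++ result)
  else result
termination_by n.toNat
decreasing_by
  rw [PySem.Int.floordiv_eq_ediv_of_pos (by norm_num)]
  omega

-- getBinaryRep n num_digits; the ValueError branch (len(result) > num_digits) is never
-- reached from genPowerset (there i < 2**len(L)), so the port returns the unpadded string there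
def getBinaryRep (n : Int) (numDigits : Int) : String :=
  let result := grLoop n ""
  (PySem.List.pyRange 0 (numDigits - PySem.Str.len result) 1).foldl (fun r _ => "0" ++ r) result

def genPowerset (L : List Int) : List (List Int) :=
  (PySem.List.pyRange 1 ((2 : Int) ^ L.length) 1).foldl (fun powerset i =>
    let binStr := getBinaryRep i (L.length : Int)
    let subset := (PySem.List.pyRange 0 (L.length : Int) 1).foldl (fun subset j =>
      if PySem.Str.pyGet? binStr j = some '1' then
        subset ++ [(PySem.List.pyGet? L j).getD 0]   -- L[j]; j is always in range here
      else subset) ([] : List Int)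
    powerset ++ [subset]) []

-- ===== PORT B =====
def genPowerset_alt (L : List Int) : List (List Int) :=
  (L.reverse.foldl (fun result x => result ++ result.map (fun s => x :: s)) [[]]).drop 1

-- ===== PRECONDITION & SPEC =====
def Spec_genPowerset (L : List Int) (out : List (List Int)) : Prop := out = genPowerset_alt L
instance (L : List Int) (out : List (List Int)) : Decidable (Spec_genPowerset L out) := by unfold Spec_genPowerset; infer_instance

-- ===== CLAIM (what is proved, stated in full; the proofs are below) =====
def Claim_equal_genPowerset : Prop := ∀ (L : List Int), Dom_genPowerset L → Spec_genPowerset L (genPowerset L)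

-- ===== LEMMAS AND PROOFS =====

-- the subset selected by mask i (most significant bit ↔ head of the list)
def msub : List Int → Nat → List Int
  | [], _ => []
  | x :: t, i => if i < 2 ^ t.length then msub t i else x :: msub t (i - 2 ^ t.length)

-- binary digits of i, MSB first, empty for 0 (what the while loop of getBinaryRep builds)
def digs (i : Nat) : List Char :=
  if h : i = 0 then [] else digs (i / 2) ++ [if i % 2 = 1 then '1' else '0']
decreasing_by omega

-- n-digit zero-padded binary representation of i % 2^n, MSB first
def bitChars : Nat → Nat → List Char
  | 0, _ => []
  | n + 1, i => (if i < 2 ^ n then '0' else '1') :: bitChars n (i % 2 ^ n)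

-- subset selected by a 0/1 character mask
def zf : List Char → List Int → List Int
  | c :: cs, a :: as => (if c = '1' then [a] else []) ++ zf cs as
  | _, _ => []

theorem grLoop_eq (i : Nat) : ∀ (r : String),
    (grLoop (i : Int) r).toList = digs i ++ r.toList := by
  induction i using Nat.strong_induction_on with
  | _ i ih =>
    intro r
    rw [grLoop, digs]
    by_cases h0 : i = 0
    · subst h0; simp
    · have hpos : ((i : Int)) > 0 := by exact_mod_cast Nat.pos_of_ne_zero h0
      rw [dif_pos hpos, dif_neg h0]
      rw [show PySem.Int.floordiv (i : Int) 2 = ((i / 2 : Nat) : Int) by simp,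
          show PySem.Int.mod (i : Int) 2 = ((i % 2 : Nat) : Int) by simp]
      rw [ih (i / 2) (by omega)]
      have ht : PySem.Int.toChars ((i : Int) % 2) = [if i % 2 = 1 then '1' else '0'] := by
        rw [show ((i : Int) % 2) = ((i % 2 : Nat) : Int) by push_cast; ring]
        rcases Nat.mod_two_eq_zero_or_one i with h | h <;> rw [h] <;> decide
      simp [ht, List.append_assoc]

theorem digs_len : ∀ (n : Nat) {i : Nat}, i < 2 ^ n → (digs i).length ≤ n := by
  intro n
  induction n with
  | zero => intro i h; interval_cases i; simp [digs]
  | succ n ih =>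
    intro i h
    rw [digs]
    by_cases h0 : i = 0
    · simp [h0]
    · rw [dif_neg h0]
      have hp : (2 : Nat) ^ (n + 1) = 2 * 2 ^ n := by ring
      have := ih (i := i / 2) (by omega)
      simp only [List.length_append, List.length_cons, List.length_nil]
      omega

theorem bitChars_length (n : Nat) : ∀ i, (bitChars n i).length = n := by
  induction n with
  | zero => intro i; simp [bitChars]
  | succ n ih => intro i; simp [bitChars, ih]

theorem bitChars_snoc : ∀ (m i : Nat), i < 2 ^ (m + 1) →
    bitChars (m + 1) i = bitChars m (i / 2) ++ [if i % 2 = 1 then '1' else '0'] := by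
  intro m
  induction m with
  | zero => intro i h; interval_cases i <;> decide
  | succ m ih =>
    intro i h
    have hp : (2 : Nat) ^ (m + 2) = 2 * 2 ^ (m + 1) := by ring
    have hp1 : (2 : Nat) ^ (m + 1) = 2 * 2 ^ m := by ring
    have hmod : i % 2 ^ (m + 1) < 2 ^ (m + 1) := Nat.mod_lt _ (by positivity)
    have hdiv : i % 2 ^ (m + 1) / 2 = i / 2 % 2 ^ m := by
      rw [hp1]; exact Nat.mod_mul_right_div_self i 2 (2 ^ m)
    have hpar : i % 2 ^ (m + 1) % 2 = i % 2 :=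
      Nat.mod_mod_of_dvd i (dvd_pow_self 2 (by omega))
    conv_lhs => rw [bitChars]
    conv_rhs => rw [bitChars]
    rw [ih _ hmod, hdiv, hpar, List.cons_append]
    by_cases hlt : i < 2 ^ (m + 1)
    · rw [if_pos hlt, if_pos (show i / 2 < 2 ^ m by omega)]
    · rw [if_neg hlt, if_neg (show ¬ i / 2 < 2 ^ m by omega)]

theorem digs_exact : ∀ (n : Nat), ∀ i, 2 ^ n ≤ i → i < 2 ^ (n + 1) → digs i = bitChars (n + 1) i := by
  intro n
  induction n with
  | zero =>
    intro i h1 h2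
    have : i = 1 := by omega
    subst this; simp [digs, bitChars]
  | succ n ih =>
    intro i h1 h2
    have hp : (2 : Nat) ^ (n + 2) = 2 * 2 ^ (n + 1) := by ring
    have hp1 : (2 : Nat) ^ (n + 1) = 2 * 2 ^ n := by ring
    rw [digs, dif_neg (by omega : ¬ i = 0)]
    rw [ih (i / 2) (by omega) (by omega)]
    rw [bitChars_snoc (n + 1) i h2]

theorem bitChars_eq : ∀ (n : Nat), ∀ i, i < 2 ^ n →
    bitChars n i = List.replicate (n - (digs i).length) '0' ++ digs i := by
  intro n
  induction n with
  | zero => intro i h; interval_cases i; simp [bitChars, digs]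
  | succ n ih =>
    intro i h
    have hp : (2 : Nat) ^ (n + 1) = 2 * 2 ^ n := by ring
    by_cases hc : i < 2 ^ n
    · have hlen := digs_len n hc
      have : bitChars (n + 1) i = '0' :: bitChars n i := by
        simp [bitChars, hc, Nat.mod_eq_of_lt hc]
      rw [this, ih i hc]
      have : n + 1 - (digs i).length = (n - (digs i).length) + 1 := by omega
      rw [this, List.replicate_succ, List.cons_append]
    · have hd := digs_exact n i (by omega) h
      have hlen : (digs i).length = n + 1 := by rw [hd]; exact bitChars_length (n + 1) i
      rw [hlen, hd]
      simp

theorem padFold (l : List Int) : ∀ (r : String),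
    (l.foldl (fun r _ => "0" ++ r) r).toList = List.replicate l.length '0' ++ r.toList := by
  induction l with
  | nil => simp
  | cons x t ih =>
    intro r
    rw [List.foldl_cons, ih]
    simp only [List.length_cons, List.replicate_succ']
    simp

theorem getBinaryRep_toList (n i : Nat) (h : i < 2 ^ n) :
    (getBinaryRep (i : Int) (n : Int)).toList = bitChars n i := by
  unfold getBinaryRep
  dsimp only
  have hres : (grLoop (i : Int) "").toList = digs i := by
    simpa using grLoop_eq i ""
  have hlen : PySem.Str.len (grLoop (i : Int) "") = ((digs i).length : Int) := by
    rw [PySem.Str.len_eq, hres]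
  have hdl := digs_len n h
  rw [hlen, PySem.List.pyRange_one, padFold]
  rw [hres, List.length_map, List.length_range]
  rw [show ((n : Int) - ((digs i).length : Int) - 0).toNat = n - (digs i).length by omega,
      ← bitChars_eq n i h]

theorem idxfold (cs₀ : List Char) (A₀ : List Int) (hlen : cs₀.length = A₀.length) :
    ∀ k (acc : List Int),
      (List.range' k (cs₀.length - k)).foldl
        (fun acc j => if cs₀[j]? = some '1' then acc ++ [(A₀[j]?).getD 0] else acc) acc
      = acc ++ zf (cs₀.drop k) (A₀.drop k) := by
  suffices H : ∀ m k (acc : List Int), m = cs₀.length - k →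
      (List.range' k m).foldl
        (fun acc j => if cs₀[j]? = some '1' then acc ++ [(A₀[j]?).getD 0] else acc) acc
      = acc ++ zf (cs₀.drop k) (A₀.drop k) by
    intro k acc; exact H _ k acc rfl
  intro m
  induction m with
  | zero =>
    intro k acc hm
    have h1 : cs₀.drop k = [] := List.drop_eq_nil_of_le (by omega)
    have h2 : A₀.drop k = [] := List.drop_eq_nil_of_le (by omega)
    simp [h1, h2, zf]
  | succ m ih =>
    intro k acc hm
    have hk : k < cs₀.length := by omega
    have hkA : k < A₀.length := by omega
    rw [List.range'_succ, List.foldl_cons, ih (k + 1) _ (by omega)]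
    rw [List.drop_eq_getElem_cons hk, List.drop_eq_getElem_cons hkA]
    rw [List.getElem?_eq_getElem hk, List.getElem?_eq_getElem hkA]
    by_cases hc : cs₀[k] = '1'
    · simp [zf, hc]
    · simp [zf, hc]

theorem zf_msub (L : List Int) : ∀ i, i < 2 ^ L.length → zf (bitChars L.length i) L = msub L i := by
  induction L with
  | nil => intro i h; simp [bitChars, zf, msub]
  | cons x t ih =>
    intro i h
    simp only [List.length_cons] at h ⊢
    have hp : (2 : Nat) ^ (t.length + 1) = 2 * 2 ^ t.length := by ring
    rw [bitChars, msub]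
    by_cases hc : i < 2 ^ t.length
    · rw [if_pos hc, if_pos hc, Nat.mod_eq_of_lt hc]
      simp [zf, ih i hc]
    · rw [if_neg hc, if_neg hc]
      have h2 : i % 2 ^ t.length = i - 2 ^ t.length := by
        rw [Nat.mod_eq_sub_mod (Nat.le_of_not_lt hc), Nat.mod_eq_of_lt (by omega)]
      rw [h2]
      simp [zf, ih (i - 2 ^ t.length) (by omega)]

theorem inner_eq (L : List Int) (i : Nat) (h2 : i < 2 ^ L.length) :
    ((PySem.List.pyRange 0 (L.length : Int) 1).foldl (fun subset j =>
      if PySem.Str.pyGet? (getBinaryRep (i : Int) ((L.length : Nat) : Int)) j = some '1' then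
        subset ++ [(PySem.List.pyGet? L j).getD 0]
      else subset) ([] : List Int)) = msub L i := by
  rw [PySem.List.pyRange_one, List.foldl_map]
  have hbs := getBinaryRep_toList L.length i h2
  have hfun : (fun (acc : List Int) (k : Nat) =>
        if PySem.Str.pyGet? (getBinaryRep (i : Int) ((L.length : Nat) : Int)) ((0 : Int) + (k : Int)) = some '1' then
          acc ++ [(PySem.List.pyGet? L ((0 : Int) + (k : Int))).getD 0]
        else acc)
      = (fun acc k => if (bitChars L.length i)[k]? = some '1' then acc ++ [(L[k]?).getD 0] else acc) := by
    funext acc k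
    simp [hbs]
  have hgoal : (List.range ((L.length : Int) - 0).toNat) = List.range' 0 ((bitChars L.length i).length - 0) := by
    rw [bitChars_length, show ((L.length : Int) - 0).toNat = L.length - 0 by omega,
        List.range_eq_range']
  rw [hfun, hgoal, idxfold _ _ (by rw [bitChars_length]) 0]
  simp [zf_msub L i h2]

theorem alt_foldl (L : List Int) :
    L.reverse.foldl (fun result x => result ++ result.map (fun s => x :: s)) [[]]
      = (List.range (2 ^ L.length)).map (msub L) := by
  induction L with
  | nil => simp [List.range_one, msub]
  | cons x t ih =>
    rw [List.reverse_cons, List.foldl_append, ih, List.foldl_cons, List.foldl_nil]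
    have h2 : (2 : Nat) ^ (x :: t).length = 2 ^ t.length + 2 ^ t.length := by
      simp [List.length_cons]; ring
    rw [h2, List.range_add, List.map_append, List.map_map]
    congr 1
    · apply List.map_congr_left
      intro k hk
      have hk' := List.mem_range.mp hk
      rw [msub, if_pos hk']
    · rw [List.map_map]
      apply List.map_congr_left
      intro k hk
      have hk' := List.mem_range.mp hk
      simp only [Function.comp_apply]
      rw [msub, if_neg (show ¬ (2 ^ t.length + k < 2 ^ t.length) by omega),
          show 2 ^ t.length + k - 2 ^ t.length = k by omega]

-- ===== VERDICT (by name: the statement is the Claim_ definition above) =====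
theorem genPowerset_spec : Claim_equal_genPowerset := by
  intro L _
  show genPowerset L = genPowerset_alt L
  unfold genPowerset genPowerset_alt
  rw [alt_foldl]
  dsimp only
  rw [PySem.List.foldl_append_singleton_eq_map, List.nil_append, PySem.List.pyRange_one 1 ((2 : Int) ^ L.length),
      List.map_map]
  have hpos : 0 < 2 ^ L.length := Nat.two_pow_pos L.length
  have hpow : ((2 : Int) ^ L.length) = ((2 ^ L.length : Nat) : Int) := by push_cast; ring
  rw [show (((2 : Int) ^ L.length) - 1).toNat = 2 ^ L.length - 1 by rw [hpow]; omega]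
  conv_rhs => rw [show (2 : Nat) ^ L.length = (2 ^ L.length - 1) + 1 by omega,
    List.range_succ_eq_map, List.map_cons, List.drop_succ_cons, List.drop_zero, List.map_map]
  apply List.map_congr_left
  intro k hk
  have hk' := List.mem_range.mp hk
  simp only [Function.comp_apply]
  rw [show (1 + (k : Int)) = (((k + 1 : Nat)) : Int) by push_cast; ring,
      inner_eq L (k + 1) (by omega)]
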